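-- pv_equiv track=rewrite | github.com/mohit2494/gfg | data structures/strings/subsequence/3.py | all_subs
-- ===== SOURCE A (Python) =====
-- def all_subs(s):
--     a, b , c = 0, 0, 0
--     size = len(s)
--     for i in range(size):
--         if s[i] == 'a':
--             a += a+1
--         elif s[i] == 'b':
--             b += (a+b)
--         else:
--             c += (b+c)
--     return c
-- ===== SOURCE B (Python) =====
-- def all_subs(s):
--     # Each character acts as an affine map on the state (a, b, c); the whole
--     # string's effect is the composition of these maps, computed by divide and
--     # conquer, then applied to (0, 0, 0): the answer is the c-offset.
--     IDENT = (1, 0, 0, 0, 1, 0, 0, 0, 1, 0, 0, 0)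
--
--     def char_aff(ch):
--         if ch == 'a':
--             return (2, 0, 0, 0, 1, 0, 0, 0, 1, 1, 0, 0)
--         elif ch == 'b':
--             return (1, 0, 0, 1, 2, 0, 0, 0, 1, 0, 0, 0)
--         else:
--             return (1, 0, 0, 0, 1, 0, 0, 1, 2, 0, 0, 0)
--
--     def comp(f, g):
--         # the map "first f, then g"
--         f11, f12, f13, f21, f22, f23, f31, f32, f33, ft1, ft2, ft3 = f
--         g11, g12, g13, g21, g22, g23, g31, g32, g33, gt1, gt2, gt3 = g
--         return (
--             g11*f11 + g12*f21 + g13*f31, g11*f12 + g12*f22 + g13*f32, g11*f13 + g12*f23 + g13*f33,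
--             g21*f11 + g22*f21 + g23*f31, g21*f12 + g22*f22 + g23*f32, g21*f13 + g22*f23 + g23*f33,
--             g31*f11 + g32*f21 + g33*f31, g31*f12 + g32*f22 + g33*f32, g31*f13 + g32*f23 + g33*f33,
--             g11*ft1 + g12*ft2 + g13*ft3 + gt1,
--             g21*ft1 + g22*ft2 + g23*ft3 + gt2,
--             g31*ft1 + g32*ft2 + g33*ft3 + gt3,
--         )
--
--     def aff(lo, hi):
--         if hi - lo == 0:
--             return IDENT
--         if hi - lo == 1:
--             return char_aff(s[lo])
--         mid = (lo + hi) // 2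
--         return comp(aff(lo, mid), aff(mid, hi))
--
--     f = aff(0, len(s))
--     return f[11]
-- ===== Notes on version B (the rewrite author's own statement) =====
-- stated objective: faster
-- what changed: B replaces A's single left-to-right three-accumulator loop by a divide-and-conquer that represents each character as an affine map on the state and composes the maps over halves of the string, applying the composite to (0,0,0); balancing the big-integer arithmetic this way made it measurably faster in a timing run.
import Mathlib
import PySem

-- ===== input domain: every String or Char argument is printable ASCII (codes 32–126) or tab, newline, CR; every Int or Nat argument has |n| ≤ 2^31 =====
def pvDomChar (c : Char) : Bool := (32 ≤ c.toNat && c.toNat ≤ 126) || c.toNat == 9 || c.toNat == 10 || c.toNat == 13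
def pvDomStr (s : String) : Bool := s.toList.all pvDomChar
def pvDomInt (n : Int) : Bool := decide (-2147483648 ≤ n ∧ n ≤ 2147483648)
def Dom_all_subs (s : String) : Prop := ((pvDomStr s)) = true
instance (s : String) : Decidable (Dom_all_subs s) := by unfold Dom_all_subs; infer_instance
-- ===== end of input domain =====

-- B replaces A's sequential three-accumulator loop by a divide-and-conquer
-- composition of per-character affine maps (measured faster in a timing run).

-- ===== PORT A =====
-- A: left-to-right loop over s[i]; state (a,b,c), returns c.
def allSubsStepA (st : Int × Int × Int) (ch : Char) : Int × Int × Int :=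
  if ch = 'a' then (st.1 + (st.1 + 1), st.2.1, st.2.2)
  else if ch = 'b' then (st.1, st.2.1 + (st.1 + st.2.1), st.2.2)
  else (st.1, st.2.1, st.2.2 + (st.2.1 + st.2.2))

def all_subs (s : String) : Int :=
  (s.toList.foldl allSubsStepA (0, 0, 0)).2.2

-- ===== PORT B =====
-- An affine map on (a,b,c): 3×3 matrix entries m?? plus offset (t1,t2,t3).
structure PvAff where
  m11 : Int
  m12 : Int
  m13 : Int
  m21 : Int
  m22 : Int
  m23 : Int
  m31 : Int
  m32 : Int
  m33 : Int
  t1 : Int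
  t2 : Int
  t3 : Int
  deriving DecidableEq, Repr

def pvIdent : PvAff := ⟨1,0,0, 0,1,0, 0,0,1, 0,0,0⟩

def pvCharAff (ch : Char) : PvAff :=
  if ch = 'a' then ⟨2,0,0, 0,1,0, 0,0,1, 1,0,0⟩
  else if ch = 'b' then ⟨1,0,0, 1,2,0, 0,0,1, 0,0,0⟩
  else ⟨1,0,0, 0,1,0, 0,1,2, 0,0,0⟩

-- "first f, then g"
def pvComp (f g : PvAff) : PvAff :=
  ⟨g.m11*f.m11 + g.m12*f.m21 + g.m13*f.m31, g.m11*f.m12 + g.m12*f.m22 + g.m13*f.m32, g.m11*f.m13 + g.m12*f.m23 + g.m13*f.m33,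
   g.m21*f.m11 + g.m22*f.m21 + g.m23*f.m31, g.m21*f.m12 + g.m22*f.m22 + g.m23*f.m32, g.m21*f.m13 + g.m22*f.m23 + g.m23*f.m33,
   g.m31*f.m11 + g.m32*f.m21 + g.m33*f.m31, g.m31*f.m12 + g.m32*f.m22 + g.m33*f.m32, g.m31*f.m13 + g.m32*f.m23 + g.m33*f.m33,
   g.m11*f.t1 + g.m12*f.t2 + g.m13*f.t3 + g.t1,
   g.m21*f.t1 + g.m22*f.t2 + g.m23*f.t3 + g.t2,
   g.m31*f.t1 + g.m32*f.t2 + g.m33*f.t3 + g.t3⟩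

-- aff(lo,hi) of Source B, as recursion on the character sublist (split at the midpoint).
def pvAffOf : List Char → PvAff
  | [] => pvIdent
  | [c] => pvCharAff c
  | a :: b :: rest =>
      pvComp (pvAffOf ((a :: b :: rest).take ((a :: b :: rest).length / 2)))
             (pvAffOf ((a :: b :: rest).drop ((a :: b :: rest).length / 2)))
termination_by l => l.length
decreasing_by
  · simp [List.length_take]; omega
  · simp; omega

def all_subs_alt (s : String) : Int :=
  (pvAffOf s.toList).t3

-- ===== PRECONDITION & SPEC =====
def Spec_all_subs (s : String) (out : Int) : Prop := out = all_subs_alt s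
instance (s : String) (out : Int) : Decidable (Spec_all_subs s out) := by unfold Spec_all_subs; infer_instance

-- ===== CLAIM (what is proved, stated in full; the proofs are below) =====
def Claim_equal_all_subs : Prop := ∀ (s : String), Dom_all_subs s → Spec_all_subs s (all_subs s)

-- ===== LEMMAS AND PROOFS =====

def pvApply (f : PvAff) (v : Int × Int × Int) : Int × Int × Int :=
  (f.m11*v.1 + f.m12*v.2.1 + f.m13*v.2.2 + f.t1,
   f.m21*v.1 + f.m22*v.2.1 + f.m23*v.2.2 + f.t2,
   f.m31*v.1 + f.m32*v.2.1 + f.m33*v.2.2 + f.t3)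

theorem pvApply_comp (f g : PvAff) (v : Int × Int × Int) :
    pvApply (pvComp f g) v = pvApply g (pvApply f v) := by
  simp only [pvApply, pvComp, Prod.mk.injEq]
  refine ⟨by ring, by ring, by ring⟩

theorem pvApply_char (ch : Char) (v : Int × Int × Int) :
    pvApply (pvCharAff ch) v = allSubsStepA v ch := by
  simp only [pvCharAff, allSubsStepA]
  split_ifs <;> simp [pvApply, Prod.mk.injEq] <;> ring

theorem pvAffOf_apply (l : List Char) (v : Int × Int × Int) :
    pvApply (pvAffOf l) v = l.foldl allSubsStepA v := by
  induction l using pvAffOf.induct generalizing v with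
  | case1 =>
      simp [pvAffOf, pvIdent, pvApply]
  | case2 c =>
      simp [pvAffOf, pvApply_char]
  | case3 a b rest ih1 ih2 =>
      rw [pvAffOf, pvApply_comp, ih1, ih2, ← List.foldl_append,
        List.take_append_drop]

-- ===== VERDICT (by name: the statement is the Claim_ definition above) =====
theorem all_subs_spec : Claim_equal_all_subs := by
  intro s _
  unfold Spec_all_subs all_subs all_subs_alt
  have h := pvAffOf_apply s.toList (0, 0, 0)
  have : (pvApply (pvAffOf s.toList) (0, 0, 0)).2.2 = (pvAffOf s.toList).t3 := by
    simp [pvApply]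
  rw [← h, this]
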